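-- pv_equiv track=rewrite | github.com/matanhaz/topicModeling | diagnoser.py | exist_functions_and_similarity
-- ===== SOURCE A (Python) =====
-- def exist_functions_and_similarity(all_functions, exists_functions):
--     func_and_similarity_of_bug = all_functions.copy()
-- # now im finiding the index only on the list of existing functions in the commit
--     exist_funcs_with_similarity = []
--
--     for func_exist in exists_functions:
--         for func_and_similarity in func_and_similarity_of_bug:
--             if func_exist == func_and_similarity[0]:
--                 exist_funcs_with_similarity.append(func_and_similarity)
--                 func_and_similarity_of_bug.remove(func_and_similarity)
--                 break
--     exist_funcs_with_similarity.sort(key=lambda x: x[1], reverse=True)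
--
--     return exist_funcs_with_similarity
-- ===== SOURCE B (Python) =====
-- def exist_functions_and_similarity(all_functions, exists_functions):
--     # Group entries once by name into per-name FIFO queues, then pop one
--     # matching entry per requested name; finally stable-sort by similarity desc.
--     queues = {}
--     for entry in all_functions:
--         queues.setdefault(entry[0], []).append(entry)
--     result = []
--     for name in exists_functions:
--         q = queues.get(name)
--         if q:
--             result.append(q.pop(0))
--     result.sort(key=lambda x: x[1], reverse=True)
--     return result
-- ===== Notes on version B (the rewrite author's own statement) =====
-- stated objective: faster
-- what changed: Replaces the per-name linear rescan of the shrinking pool (with list.remove) by a dict of per-name FIFO queues built in one pass, popping one entry per requested name, then the same stable descending sort.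
import Mathlib
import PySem

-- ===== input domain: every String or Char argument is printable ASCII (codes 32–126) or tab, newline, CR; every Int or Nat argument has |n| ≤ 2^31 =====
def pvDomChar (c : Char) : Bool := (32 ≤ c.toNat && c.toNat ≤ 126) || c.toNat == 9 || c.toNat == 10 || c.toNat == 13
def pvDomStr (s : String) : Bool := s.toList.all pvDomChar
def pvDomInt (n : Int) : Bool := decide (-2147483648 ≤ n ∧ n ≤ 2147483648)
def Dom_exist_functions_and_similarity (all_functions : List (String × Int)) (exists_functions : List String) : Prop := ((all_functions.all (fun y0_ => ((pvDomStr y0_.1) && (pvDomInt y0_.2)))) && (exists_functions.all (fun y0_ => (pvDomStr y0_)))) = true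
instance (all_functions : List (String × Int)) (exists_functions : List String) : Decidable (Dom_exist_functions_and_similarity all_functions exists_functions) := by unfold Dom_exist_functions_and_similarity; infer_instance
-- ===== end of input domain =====

-- B groups entries once into per-name FIFO queues (a dict) instead of rescanning
-- and mutating the pool per requested name; same stable descending sort. Objective: faster.


-- ===== PORT A =====
-- inner 'for … if … break' = find?; 'pool.remove(fas)' = PySem.List.remove? (fas came
-- from the pool, so it is present; getD is only a totality guard)
def pvStepA (st : List (String × Int) × List (String × Int)) (func_exist : String) :
    List (String × Int) × List (String × Int) :=
  match st.2.find? (fun fas => func_exist == fas.1) with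
  | some fas => (st.1 ++ [fas], (PySem.List.remove? st.2 fas).getD st.2)
  | none => st

def exist_functions_and_similarity (all_functions : List (String × Int)) (exists_functions : List String) : List (String × Int) :=
  let st := exists_functions.foldl pvStepA ([], all_functions)
  PySem.List.sorted st.1 (fun x => x.2) true

-- ===== PORT B =====
-- 'queues.setdefault(entry[0], []).append(entry)' = Dict.modify; 'q = queues.get(name); if q:'
-- = match on getD name [] (None and [] are both falsy); 'q.pop(0)' = insert the tail back
def pvStepB (st : List (String × Int) × PySem.Dict String (List (String × Int))) (name : String) :
    List (String × Int) × PySem.Dict String (List (String × Int)) :=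
  match st.2.getD name [] with
  | [] => st
  | e :: rest => (st.1 ++ [e], st.2.insert name rest)

def exist_functions_and_similarity_alt (all_functions : List (String × Int)) (exists_functions : List String) : List (String × Int) :=
  let queues := all_functions.foldl (fun d e => d.modify e.1 [] (· ++ [e])) PySem.Dict.empty
  let res := (exists_functions.foldl pvStepB ([], queues)).1
  PySem.List.sorted res (fun x => x.2) true

-- ===== PRECONDITION & SPEC =====
def Spec_exist_functions_and_similarity (all_functions : List (String × Int)) (exists_functions : List String) (out : List (String × Int)) : Prop := out = exist_functions_and_similarity_alt all_functions exists_functions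
instance (all_functions : List (String × Int)) (exists_functions : List String) (out : List (String × Int)) : Decidable (Spec_exist_functions_and_similarity all_functions exists_functions out) := by unfold Spec_exist_functions_and_similarity; infer_instance

-- ===== CLAIM (what is proved, stated in full; the proofs are below) =====
def Claim_equal_exist_functions_and_similarity : Prop := ∀ (all_functions : List (String × Int)) (exists_functions : List String), Dom_exist_functions_and_similarity all_functions exists_functions → Spec_exist_functions_and_similarity all_functions exists_functions (exist_functions_and_similarity all_functions exists_functions)

-- ===== LEMMAS AND PROOFS =====

-- if no pool element matches, A's inner loop finds nothing
theorem pv_find_of_filter_nil (pool : List (String × Int)) (name : String)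
    (h : pool.filter (fun x => x.1 == name) = []) :
    pool.find? (fun fas => name == fas.1) = none := by
  rw [List.find?_eq_none]
  intro x hx
  have := List.filter_eq_nil_iff.mp h x hx
  simp at this ⊢
  exact fun hh => this hh.symm

-- the head of the per-name filter is exactly the element A's break stops at
theorem pv_find_of_filter_cons (pool : List (String × Int)) (name : String)
    (e : String × Int) (rest : List (String × Int))
    (h : pool.filter (fun x => x.1 == name) = e :: rest) :
    pool.find? (fun fas => name == fas.1) = some e := by
  induction pool with
  | nil => simp at h
  | cons x xs ih =>
    by_cases hx : x.1 = name
    · have hxb : (x.1 == name) = true := by simp [hx]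
      simp only [List.filter_cons, hxb, if_true] at h
      obtain ⟨rfl, -⟩ := List.cons.inj h
      have hb : (name == x.1) = true := by simp [hx]
      simp [hb]
    · have hxb : (x.1 == name) = false := by simp [hx]
      simp only [List.filter_cons, hxb, Bool.false_eq_true, if_false] at h
      have hb : (name == x.1) = false := by
        simp; exact fun hh => hx hh.symm
      simp [hb, ih h]

-- erasing that head from the pool removes exactly one entry of that name
theorem pv_erase_filter (pool : List (String × Int)) (name : String)
    (e : String × Int) (rest : List (String × Int))
    (h : pool.filter (fun x => x.1 == name) = e :: rest) (name' : String) :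
    (pool.erase e).filter (fun x => x.1 == name') =
      if name' = name then rest else pool.filter (fun x => x.1 == name') := by
  induction pool with
  | nil => simp at h
  | cons x xs ih =>
    by_cases hx : x.1 = name
    · have hxb : (x.1 == name) = true := by simp [hx]
      simp only [List.filter_cons, hxb, if_true] at h
      obtain ⟨rfl, rfl⟩ := List.cons.inj h
      rw [List.erase_cons_head]
      by_cases hn : name' = name
      · simp [hn]
      · have hxn : (x.1 == name') = false := by
          simp [hx]; exact fun hh => hn hh.symm
        simp [hxn, hn]
    · have hxb : (x.1 == name) = false := by simp [hx]
      simp only [List.filter_cons, hxb, Bool.false_eq_true, if_false] at h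
      have he : e ∈ xs.filter (fun y => y.1 == name) := h ▸ List.mem_cons_self ..
      have he1 : (e.1 == name) = true := (List.mem_filter.mp he).2
      have hne : x ≠ e := by
        intro hxe; rw [hxe, he1] at hxb; cases hxb
      rw [List.erase_cons_tail (by simpa using hne)]
      by_cases hn : name' = name
      · subst hn
        simp [hxb, ih h]
      · by_cases hxn : x.1 = name'
        · have hb : (x.1 == name') = true := by simp [hxn]
          simp [hb, ih h, hn]
        · have hb : (x.1 == name') = false := by simp [hxn]
          simp [hb, ih h, hn]

-- the core simulation: A's (acc, shrinking pool) loop and B's (acc, queue dict) loop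
-- produce the same accumulator whenever the dict holds exactly the per-name filters
theorem pv_loop_eq (efs : List String) :
    ∀ (acc pool : List (String × Int)) (d : PySem.Dict String (List (String × Int))),
    (∀ name, d.getD name [] = pool.filter (fun x => x.1 == name)) →
    (efs.foldl pvStepA (acc, pool)).1 = (efs.foldl pvStepB (acc, d)).1 := by
  induction efs with
  | nil => intro acc pool d _; rfl
  | cons name efs ih =>
    intro acc pool d hrel
    simp only [List.foldl_cons]
    rcases hfil : pool.filter (fun x => x.1 == name) with _ | ⟨e, rest⟩
    · have hA : pvStepA (acc, pool) name = (acc, pool) := by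
        unfold pvStepA
        rw [pv_find_of_filter_nil pool name hfil]
      have hB : pvStepB (acc, d) name = (acc, d) := by
        unfold pvStepB
        rw [hrel name, hfil]
      rw [hA, hB]; exact ih acc pool d hrel
    · have hmem : e ∈ pool := List.mem_of_mem_filter (hfil ▸ List.mem_cons_self ..)
      have hA : pvStepA (acc, pool) name = (acc ++ [e], pool.erase e) := by
        unfold pvStepA
        rw [pv_find_of_filter_cons pool name e rest hfil]
        simp [PySem.List.remove?_eq_some_erase, hmem]
      have hB : pvStepB (acc, d) name = (acc ++ [e], d.insert name rest) := by
        unfold pvStepB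
        rw [hrel name, hfil]
      rw [hA, hB]
      apply ih
      intro name'
      rw [PySem.Dict.getD_insert, pv_erase_filter pool name e rest hfil name']
      by_cases hn : name' = name
      · simp [hn]
      · simp [hn, hrel name']

-- the queue dict built by B's first pass holds exactly the per-name filters
theorem pv_buildQ_getD (afs : List (String × Int)) (name : String) :
    (afs.foldl (fun d e => d.modify e.1 [] (· ++ [e])) PySem.Dict.empty).getD name [] =
      afs.filter (fun x => x.1 == name) := by
  have hmap : afs.foldl (fun d e => d.modify e.1 [] (· ++ [e])) PySem.Dict.empty =
      (afs.map (fun e => (e.1, e))).foldl (fun d p => d.modify p.1 [] (· ++ [p.2]))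
        PySem.Dict.empty := by
    rw [List.foldl_map]
  rw [hmap, PySem.Dict.getD_foldl_modify_append]
  simp [List.filter_map, Function.comp_def]

-- ===== VERDICT (by name: the statement is the Claim_ definition above) =====
theorem exist_functions_and_similarity_spec : Claim_equal_exist_functions_and_similarity := by
  intro afs efs _
  unfold Spec_exist_functions_and_similarity
  show PySem.List.sorted (List.foldl pvStepA ([], afs) efs).1 (fun x => x.2) true =
    PySem.List.sorted (List.foldl pvStepB
      ([], afs.foldl (fun d e => d.modify e.1 [] (· ++ [e])) PySem.Dict.empty) efs).1
      (fun x => x.2) true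
  rw [pv_loop_eq efs [] afs
    (afs.foldl (fun d e => d.modify e.1 [] (· ++ [e])) PySem.Dict.empty)
    (fun name => pv_buildQ_getD afs name)]
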